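-- pv_equiv track=rewrite | github.com/henry808/euler | 048/eul048.py | last_digits
-- ===== SOURCE A (Python) =====
-- def last_digits(n):
--     total = 0
--     for i in range(1, n + 1):
--         x = 1
--         for j in range(i):
--             x *= i
--             x = x % 10000000000
--         total += x
--     return total % 10000000000
-- ===== SOURCE B (Python) =====
-- def last_digits(n):
--     mod = 10000000000
--     total = 0
--     for i in range(1, n + 1):
--         # square-and-multiply: i**i mod 10**10 in O(log i) multiplications
--         result = 1
--         base = i % mod
--         exp = i
--         while exp > 0:
--             if exp % 2 == 1:
--                 result = result * base % mod
--             base = base * base % mod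
--             exp //= 2
--         total += result
--     return total % mod
-- ===== Notes on version B (the rewrite author's own statement) =====
-- stated objective: faster
-- what changed: Each term i^i mod 10^10 is computed by binary (square-and-multiply) exponentiation instead of i naive modular multiplications.
import Mathlib
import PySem

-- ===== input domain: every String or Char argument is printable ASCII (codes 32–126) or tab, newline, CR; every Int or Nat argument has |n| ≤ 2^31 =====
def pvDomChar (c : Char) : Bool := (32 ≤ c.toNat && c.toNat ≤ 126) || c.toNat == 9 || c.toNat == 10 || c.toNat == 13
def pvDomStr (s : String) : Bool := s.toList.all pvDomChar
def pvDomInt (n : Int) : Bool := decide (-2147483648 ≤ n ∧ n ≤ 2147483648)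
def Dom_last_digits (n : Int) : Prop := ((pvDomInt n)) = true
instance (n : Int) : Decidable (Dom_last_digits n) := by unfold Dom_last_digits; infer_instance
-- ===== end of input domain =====

-- B replaces A's inner loop of i modular multiplications by binary square-and-multiply (objective: faster).

-- ===== PORT A =====
def last_digits (n : Int) : Int :=
  ((PySem.List.pyRange 1 (n + 1) 1).foldl
    (fun total i =>
      total + (PySem.List.pyRange 0 i 1).foldl (fun x _ => x * i % 10000000000) 1)
    0) % 10000000000

-- ===== PORT B =====
-- while exp > 0: if exp % 2 == 1: result = result*base % mod; base = base*base % mod; exp //= 2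
def pvPowLoop (result base exp : Int) : Int :=
  if h : 0 < exp then
    pvPowLoop (if exp % 2 = 1 then result * base % 10000000000 else result)
      (base * base % 10000000000) (PySem.Int.floordiv exp 2)
  else result
termination_by exp.toNat
decreasing_by
  rw [PySem.Int.floordiv_eq_ediv_of_pos (by omega)]
  omega

def last_digits_alt (n : Int) : Int :=
  ((PySem.List.pyRange 1 (n + 1) 1).foldl
    (fun total i => total + pvPowLoop 1 (i % 10000000000) i)
    0) % 10000000000

-- ===== PRECONDITION & SPEC =====
def Spec_last_digits (n : Int) (out : Int) : Prop := out = last_digits_alt n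
instance (n : Int) (out : Int) : Decidable (Spec_last_digits n out) := by unfold Spec_last_digits; infer_instance

-- ===== CLAIM (what is proved, stated in full; the proofs are below) =====
def Claim_equal_last_digits : Prop := ∀ (n : Int), Dom_last_digits n → Spec_last_digits n (last_digits n)

-- ===== LEMMAS AND PROOFS =====

-- a ^ k % M = (a % M) ^ k % M
theorem pvPowModAux (a : Int) (k : Nat) :
    a ^ k % 10000000000 = (a % 10000000000) ^ k % 10000000000 := by
  induction k with
  | zero => simp
  | succ k ih =>
    rw [pow_succ, pow_succ, Int.mul_emod, ih]
    conv_rhs => rw [Int.mul_emod, Int.emod_emod_of_dvd _ dvd_rfl]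

-- A's inner loop: starting from init, l.length multiplications-with-mod give init * i^l.length % M.
theorem pvInnerA (i : Int) (l : List Int) (init : Int) (hl : l ≠ []) :
    l.foldl (fun x _ => x * i % 10000000000) init = init * i ^ l.length % 10000000000 := by
  induction l generalizing init with
  | nil => exact absurd rfl hl
  | cons a t ih =>
    by_cases ht : t = []
    · subst ht; simp [List.foldl]
    · have := ih (init * i % 10000000000) ht
      simp only [List.foldl, this, List.length_cons]
      conv_lhs => rw [Int.mul_emod, Int.emod_emod_of_dvd _ dvd_rfl, ← Int.mul_emod]
      ring_nf

-- B's loop computes r * b^e % M for any positive exponent e.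
theorem pvPowLoopEq (e : Nat) (he : 1 ≤ e) (r b : Int) :
    pvPowLoop r b (e : Int) = r * b ^ e % 10000000000 := by
  induction e using Nat.strong_induction_on generalizing r b with
  | _ e ih =>
    rw [pvPowLoop]
    have hpos : (0 : Int) < (e : Int) := by exact_mod_cast he
    rw [dif_pos hpos]
    have hdiv : PySem.Int.floordiv (e : Int) 2 = ((e / 2 : Nat) : Int) := by
      rw [PySem.Int.floordiv_eq_ediv_of_pos (by omega)]
      exact_mod_cast rfl
    by_cases h2 : e / 2 = 0
    · -- e = 1
      have he1 : e = 1 := by omega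
      subst he1
      rw [hdiv]
      norm_num
      rw [pvPowLoop]
      norm_num
    · have hlt : e / 2 < e := by omega
      have := ih (e / 2) hlt (by omega)
      rw [hdiv, this]
      have hmod : ((e : Int) % 2 = 1) ↔ e % 2 = 1 := by omega
      by_cases hodd : e % 2 = 1
      · rw [if_pos (hmod.mpr hodd)]
        have hpow : b ^ e = b * (b * b) ^ (e / 2) := by
          rw [← pow_two, ← pow_mul]
          rw [show 2 * (e / 2) = e - 1 by omega, ← pow_succ']
          congr 1; omega
        rw [hpow]
        conv_lhs => rw [Int.mul_emod, Int.emod_emod_of_dvd _ dvd_rfl, ← pvPowModAux,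
          ← Int.mul_emod]
        ring_nf
      · rw [if_neg (fun h => hodd (hmod.mp h))]
        have hpow : b ^ e = (b * b) ^ (e / 2) := by
          rw [← pow_two, ← pow_mul]; congr 1; omega
        rw [hpow]
        conv_lhs => rw [Int.mul_emod, ← pvPowModAux, ← Int.mul_emod]

-- the two per-term computations agree for every i in range(1, n+1)
theorem pvTermEq (i : Int) (hi : 1 ≤ i) :
    (PySem.List.pyRange 0 i 1).foldl (fun x _ => x * i % 10000000000) 1
      = pvPowLoop 1 (i % 10000000000) i := by
  have hlen : (PySem.List.pyRange 0 i 1).length = i.toNat := by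
    rw [PySem.List.length_pyRange_one]; omega
  have hne : PySem.List.pyRange 0 i 1 ≠ [] := by
    intro h
    have := congrArg List.length h
    rw [hlen] at this
    simp at this; omega
  have hcast : ((i.toNat : Nat) : Int) = i := by omega
  rw [pvInnerA i _ 1 hne, hlen]
  conv_rhs => rw [← hcast]
  rw [pvPowLoopEq i.toNat (by omega), one_mul, one_mul, hcast]
  exact pvPowModAux i i.toNat

theorem last_digits_eq_alt (n : Int) : last_digits n = last_digits_alt n := by
  unfold last_digits last_digits_alt
  congr 1
  apply PySem.List.foldl_congr_mem
  intro total i hmem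
  have hi : 1 ≤ i := ((PySem.List.mem_pyRange_one).1 hmem).1
  rw [pvTermEq i hi]

-- ===== VERDICT (by name: the statement is the Claim_ definition above) =====
theorem last_digits_spec : Claim_equal_last_digits := by
  intro n _
  exact last_digits_eq_alt n
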